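-- pv_equiv track=rewrite | github.com/aryanjand/Cryptography-Payground | algo/task1.py | __is_divisible_by_small_primes
-- ===== SOURCE A (Python) =====
-- def __is_divisible_by_small_primes(candidate: int) -> bool:
--     SMALL_PRIMES = [2, 3, 5, 7, 11, 13, 17, 19, 23, 29]
--
--     if candidate < 2:
--         return False
--
--     for prime in SMALL_PRIMES:
--         if candidate % prime == 0:
--             return False
--     return True
-- ===== SOURCE B (Python) =====
-- import math
--
-- def __is_divisible_by_small_primes(candidate: int) -> bool:
--     # product of the ten small primes 2..29
--     P = 6469693230
--     return candidate >= 2 and math.gcd(candidate, P) == 1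
-- ===== Notes on version B (the rewrite author's own statement) =====
-- stated objective: idiomatic
-- what changed: Replaces the trial-division loop over the ten small primes by a single Euclidean gcd against their precomputed product (coprime iff no small prime divides).
import Mathlib
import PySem

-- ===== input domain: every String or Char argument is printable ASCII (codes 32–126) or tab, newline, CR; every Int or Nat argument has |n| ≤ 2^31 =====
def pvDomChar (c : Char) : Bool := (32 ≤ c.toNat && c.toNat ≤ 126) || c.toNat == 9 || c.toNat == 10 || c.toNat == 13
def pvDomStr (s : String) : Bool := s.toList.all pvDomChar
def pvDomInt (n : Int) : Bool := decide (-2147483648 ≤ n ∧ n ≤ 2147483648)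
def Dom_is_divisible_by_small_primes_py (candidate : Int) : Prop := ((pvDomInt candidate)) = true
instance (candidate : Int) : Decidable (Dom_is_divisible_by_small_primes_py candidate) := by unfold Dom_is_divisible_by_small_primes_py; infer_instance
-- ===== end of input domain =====

-- B replaces A's trial-division loop over the ten small primes by one gcd
-- against their precomputed product (objective: idiomatic / alternative algorithm).

-- ===== PORT A =====
-- the 'for prime in SMALL_PRIMES' loop with its early 'return False'
def spLoop (candidate : Int) : List Int → Bool
  | [] => true
  | p :: rest => if PySem.Int.mod candidate p = 0 then false else spLoop candidate rest

def is_divisible_by_small_primes_py (candidate : Int) : Bool :=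
  let SMALL_PRIMES : List Int := [2, 3, 5, 7, 11, 13, 17, 19, 23, 29]
  if candidate < 2 then false
  else spLoop candidate SMALL_PRIMES

-- ===== PORT B =====
-- Source B: candidate >= 2 and math.gcd(candidate, 6469693230) == 1
def is_divisible_by_small_primes_py_alt (candidate : Int) : Bool :=
  decide (candidate ≥ 2) && (Int.gcd candidate 6469693230 == 1)

-- ===== PRECONDITION & SPEC =====
def Spec_is_divisible_by_small_primes_py (candidate : Int) (out : Bool) : Prop := out = is_divisible_by_small_primes_py_alt candidate
instance (candidate : Int) (out : Bool) : Decidable (Spec_is_divisible_by_small_primes_py candidate out) := by unfold Spec_is_divisible_by_small_primes_py; infer_instance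

-- ===== CLAIM (what is proved, stated in full; the proofs are below) =====
def Claim_equal_is_divisible_by_small_primes_py : Prop := ∀ (candidate : Int), Dom_is_divisible_by_small_primes_py candidate → Spec_is_divisible_by_small_primes_py candidate (is_divisible_by_small_primes_py candidate)

-- ===== LEMMAS AND PROOFS =====

-- gcd with the product 6469693230 = 2·3·5·7·11·13·17·19·23·29 is 1
-- exactly when none of the ten primes divides c
theorem gcd_prod_eq_one_iff (c : Int) :
    Int.gcd c 6469693230 = 1 ↔
      (¬(2:Int) ∣ c ∧ ¬(3:Int) ∣ c ∧ ¬(5:Int) ∣ c ∧ ¬(7:Int) ∣ c ∧ ¬(11:Int) ∣ c ∧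
       ¬(13:Int) ∣ c ∧ ¬(17:Int) ∣ c ∧ ¬(19:Int) ∣ c ∧ ¬(23:Int) ∣ c ∧ ¬(29:Int) ∣ c) := by
  have hd : ∀ p : Nat, (p ∣ c.natAbs ↔ (p:Int) ∣ c) := by
    intro p
    rw [← Int.natAbs_dvd_natAbs]
    simp
  have hcop : ∀ p : Nat, p.Prime → (Nat.Coprime c.natAbs p ↔ ¬ (p:Int) ∣ c) := by
    intro p hp
    rw [Nat.coprime_comm, hp.coprime_iff_not_dvd, hd]
  have h1 : Int.gcd c 6469693230 = Nat.gcd c.natAbs 6469693230 := rfl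
  have h2 : (6469693230 : Nat) = 2*(3*(5*(7*(11*(13*(17*(19*(23*29)))))))) := by norm_num
  rw [h1]
  show Nat.Coprime c.natAbs 6469693230 ↔ _
  rw [h2]
  simp only [Nat.coprime_mul_iff_right]
  rw [hcop 2 (by norm_num), hcop 3 (by norm_num), hcop 5 (by norm_num), hcop 7 (by norm_num),
    hcop 11 (by norm_num), hcop 13 (by norm_num), hcop 17 (by norm_num), hcop 19 (by norm_num),
    hcop 23 (by norm_num), hcop 29 (by norm_num)]
  norm_num

-- the A-loop over the literal prime list computes exactly the gcd test
theorem loop_eq_gcd (c : Int) :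
    spLoop c [2, 3, 5, 7, 11, 13, 17, 19, 23, 29] = decide (Int.gcd c 6469693230 = 1) := by
  simp only [spLoop, PySem.Int.mod_eq_zero_iff_dvd]
  split_ifs with h2 h3 h5 h7 h11 h13 h17 h19 h23 h29
  all_goals simp [gcd_prod_eq_one_iff, *]

-- ===== VERDICT (by name: the statement is the Claim_ definition above) =====
theorem is_divisible_by_small_primes_py_spec : Claim_equal_is_divisible_by_small_primes_py := by
  intro c _
  unfold Spec_is_divisible_by_small_primes_py is_divisible_by_small_primes_py is_divisible_by_small_primes_py_alt
  by_cases h : c < 2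
  · simp [h, show ¬ c ≥ 2 by omega]
  · have h2 : c ≥ 2 := by omega
    rw [if_neg h, loop_eq_gcd, Bool.eq_iff_iff]
    simp [h2]
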